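-- pv_equiv track=rewrite | github.com/gigo-gigo/atcoder | abc/abc455/e.py | solve
-- ===== SOURCE A (Python) =====
-- from collections import Counter
--
-- def solve(N, S):
--     A = [0]
--     B = [0]
--     C = [0]
--     for s in S:
--         A.append(A[-1] + int(s == "A"))
--         B.append(B[-1] + int(s == "B"))
--         C.append(C[-1] + int(s == "C"))
--
--     ans = N * (N + 1) // 2
--
--     X = Counter()
--     for a, b, c in zip(A, B, C):
--         X[(a - b, a - c)] += 1
--     for v in X.values():
--         ans += 2 * (v * (v - 1) // 2)
--
--     X = Counter()
--     for a, b in zip(A, B):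
--         X[a - b] += 1
--     for v in X.values():
--         ans -= v * (v - 1) // 2
--
--     X = Counter()
--     for a, c in zip(A, C):
--         X[a - c] += 1
--     for v in X.values():
--         ans -= v * (v - 1) // 2
--
--     X = Counter()
--     for b, c in zip(B, C):
--         X[b - c] += 1
--     for v in X.values():
--         ans -= v * (v - 1) // 2
--
--     return ans
-- ===== SOURCE B (Python) =====
-- def solve(N, S):
--     ans = N * (N + 1) // 2
--     a = b = c = 0
--     d3 = {(0, 0): 1}
--     dab = {0: 1}
--     dac = {0: 1}
--     dbc = {0: 1}
--     for ch in S: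
--         a += ch == "A"
--         b += ch == "B"
--         c += ch == "C"
--         t = d3.get((a - b, a - c), 0); d3[(a - b, a - c)] = t + 1; ans += 2 * t
--         t = dab.get(a - b, 0); dab[a - b] = t + 1; ans -= t
--         t = dac.get(a - c, 0); dac[a - c] = t + 1; ans -= t
--         t = dbc.get(b - c, 0); dbc[b - c] = t + 1; ans -= t
--     return ans
-- ===== Notes on version B (the rewrite author's own statement) =====
-- stated objective: alternative
-- what changed: Replaces the three prefix-sum arrays, the four Counter tallies of the full key streams and the four follow-up loops summing v*(v-1)//2 over counter values by a single streaming pass that keeps running A/B/C counts and, for each of the four keyings, pays the number of previously seen equal keys incrementally as each prefix arrives.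
import Mathlib
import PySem

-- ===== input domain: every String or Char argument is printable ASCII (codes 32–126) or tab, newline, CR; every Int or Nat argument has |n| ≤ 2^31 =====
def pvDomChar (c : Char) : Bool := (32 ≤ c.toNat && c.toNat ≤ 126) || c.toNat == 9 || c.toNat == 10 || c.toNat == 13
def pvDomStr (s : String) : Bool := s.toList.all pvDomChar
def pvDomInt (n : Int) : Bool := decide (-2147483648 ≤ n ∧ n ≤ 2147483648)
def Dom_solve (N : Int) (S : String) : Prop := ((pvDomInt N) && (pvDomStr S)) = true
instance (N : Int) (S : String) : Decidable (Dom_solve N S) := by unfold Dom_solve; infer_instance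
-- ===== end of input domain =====

-- B replaces the prefix arrays + four Counters + four value-summing loops by one streaming
-- pass over the string that pays pair counts incrementally; same return value on all inputs.

-- ===== PORT A =====
-- the loop body building the three prefix arrays (A[-1] read as getLast?.getD 0: the lists are never empty)
def buildStep (t : List Int × List Int × List Int) (s : Char) : List Int × List Int × List Int :=
  (t.1 ++ [t.1.getLast?.getD 0 + (if s == 'A' then 1 else 0)],
   t.2.1 ++ [t.2.1.getLast?.getD 0 + (if s == 'B' then 1 else 0)],
   t.2.2 ++ [t.2.2.getLast?.getD 0 + (if s == 'C' then 1 else 0)])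

def solve (N : Int) (S : String) : Int :=
  let abc := S.toList.foldl buildStep ([0], [0], [0])
  let A := abc.1
  let B := abc.2.1
  let C := abc.2.2
  let ans := PySem.Int.floordiv (N * (N + 1)) 2
  let X := (A.zip (B.zip C)).foldl
    (fun (d : PySem.Dict (Int × Int) Int) p => d.modify (p.1 - p.2.1, p.1 - p.2.2) 0 (· + 1))
    PySem.Dict.empty
  let ans := X.values.foldl (fun a v => a + 2 * PySem.Int.floordiv (v * (v - 1)) 2) ans
  let Xab := (A.zip B).foldl
    (fun (d : PySem.Dict Int Int) p => d.modify (p.1 - p.2) 0 (· + 1)) PySem.Dict.empty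
  let ans := Xab.values.foldl (fun a v => a - PySem.Int.floordiv (v * (v - 1)) 2) ans
  let Xac := (A.zip C).foldl
    (fun (d : PySem.Dict Int Int) p => d.modify (p.1 - p.2) 0 (· + 1)) PySem.Dict.empty
  let ans := Xac.values.foldl (fun a v => a - PySem.Int.floordiv (v * (v - 1)) 2) ans
  let Xbc := (B.zip C).foldl
    (fun (d : PySem.Dict Int Int) p => d.modify (p.1 - p.2) 0 (· + 1)) PySem.Dict.empty
  let ans := Xbc.values.foldl (fun a v => a - PySem.Int.floordiv (v * (v - 1)) 2) ans
  ans

-- ===== PORT B =====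
structure EState where
  a : Int
  b : Int
  c : Int
  d3 : PySem.Dict (Int × Int) Int
  dab : PySem.Dict Int Int
  dac : PySem.Dict Int Int
  dbc : PySem.Dict Int Int
  ans : Int

def bStep (st : EState) (ch : Char) : EState :=
  let a := st.a + (if ch == 'A' then 1 else 0)
  let b := st.b + (if ch == 'B' then 1 else 0)
  let c := st.c + (if ch == 'C' then 1 else 0)
  let t3 := st.d3.getD (a - b, a - c) 0
  let tab := st.dab.getD (a - b) 0
  let tac := st.dac.getD (a - c) 0
  let tbc := st.dbc.getD (b - c) 0
  { a := a, b := b, c := c,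
    d3 := st.d3.insert (a - b, a - c) (t3 + 1),
    dab := st.dab.insert (a - b) (tab + 1),
    dac := st.dac.insert (a - c) (tac + 1),
    dbc := st.dbc.insert (b - c) (tbc + 1),
    ans := st.ans + 2 * t3 - tab - tac - tbc }

def solve_alt (N : Int) (S : String) : Int :=
  let init : EState :=
    { a := 0, b := 0, c := 0,
      d3 := PySem.Dict.ofList [((0, 0), 1)],
      dab := PySem.Dict.ofList [(0, 1)],
      dac := PySem.Dict.ofList [(0, 1)],
      dbc := PySem.Dict.ofList [(0, 1)],
      ans := PySem.Int.floordiv (N * (N + 1)) 2 }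
  (S.toList.foldl bStep init).ans

-- ===== PRECONDITION & SPEC =====
def Spec_solve (N : Int) (S : String) (out : Int) : Prop := out = solve_alt N S
instance (N : Int) (S : String) (out : Int) : Decidable (Spec_solve N S out) := by unfold Spec_solve; infer_instance

-- ===== CLAIM (what is proved, stated in full; the proofs are below) =====
def Claim_equal_solve : Prop := ∀ (N : Int) (S : String), Dom_solve N S → Spec_solve N S (solve N S)

-- ===== LEMMAS AND PROOFS =====

-- the running (countA, countB, countC) triple and its trace over the string
def updT (t : Int × Int × Int) (ch : Char) : Int × Int × Int :=
  (t.1 + (if ch == 'A' then 1 else 0),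
   t.2.1 + (if ch == 'B' then 1 else 0),
   t.2.2 + (if ch == 'C' then 1 else 0))

def trip (t : Int × Int × Int) : List Char → List (Int × Int × Int)
  | [] => [t]
  | ch :: cs => t :: trip (updT t ch) cs

def tripT (t : Int × Int × Int) : List Char → List (Int × Int × Int)
  | [] => []
  | ch :: cs => updT t ch :: tripT (updT t ch) cs

def key3 (x : Int × Int × Int) : Int × Int := (x.1 - x.2.1, x.1 - x.2.2)
def kab (x : Int × Int × Int) : Int := x.1 - x.2.1
def kac (x : Int × Int × Int) : Int := x.1 - x.2.2
def kbc (x : Int × Int × Int) : Int := x.2.1 - x.2.2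

-- the per-dict view of B's loop: final dict and incremental pair count along a key stream
def dfin {K : Type} [BEq K] (d : PySem.Dict K Int) (L : List K) : PySem.Dict K Int :=
  L.foldl (fun d k => d.insert k (d.getD k 0 + 1)) d

def cnt {K : Type} [BEq K] (d : PySem.Dict K Int) : List K → Int
  | [] => 0
  | k :: L => d.getD k 0 + cnt (d.insert k (d.getD k 0 + 1)) L

def f2 (v : Int) : Int := PySem.Int.floordiv (v * (v - 1)) 2

-- A's per-counter contribution: sum of C(count,2) over the distinct keys
def S2 {K : Type} [BEq K] (L : List K) : Int :=
  ((PySem.Set.ofList L).map (fun k => f2 ((L.count k : Int)))).sum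

theorem trip_eq_cons (t : Int × Int × Int) (cs : List Char) :
    trip t cs = t :: tripT t cs := by
  induction cs generalizing t with
  | nil => rfl
  | cons ch cs ih => simp [trip, tripT, ih]

theorem f2_succ (c : Int) : f2 (c + 1) = f2 c + c := by
  unfold f2
  obtain ⟨m, hm⟩ : ∃ m, c * (c - 1) = 2 * m := by
    rcases Int.even_or_odd c with ⟨r, hr⟩ | ⟨r, hr⟩
    · exact ⟨r * (c - 1), by rw [hr]; ring⟩
    · exact ⟨c * r, by rw [hr]; ring⟩
  have h1 : (c + 1) * (c + 1 - 1) = 2 * (m + c) := by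
    rw [show (c + 1) * (c + 1 - 1) = c * (c - 1) + 2 * c by ring, hm]; ring
  rw [hm, h1, PySem.Int.floordiv_eq_ediv_of_pos (by norm_num),
    PySem.Int.floordiv_eq_ediv_of_pos (by norm_num),
    Int.mul_ediv_cancel_left _ (by norm_num), Int.mul_ediv_cancel_left _ (by norm_num)]

theorem foldl_sub {α : Type} (l : List α) (g : α → Int) (init : Int) :
    l.foldl (fun a v => a - g v) init = init - (l.map g).sum := by
  induction l generalizing init with
  | nil => simp
  | cons x l ih => simp [ih]; ring

theorem cnt_append {K : Type} [BEq K] [LawfulBEq K] (M : List K) (x : K) (d : PySem.Dict K Int) :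
    cnt d (M ++ [x]) = cnt d M + (dfin d M).getD x 0 := by
  induction M generalizing d with
  | nil => simp [cnt, dfin]
  | cons k M ih => simp [cnt, dfin, ih]; ring

theorem sum_map_update {K : Type} [DecidableEq K] (s : List K) (x : K) (hx : x ∈ s)
    (hnd : s.Nodup) (g : K → Int) (c : Int) :
    (s.map (fun k => if k = x then g k + c else g k)).sum = (s.map g).sum + c := by
  induction s with
  | nil => cases hx
  | cons a s ih =>
    rcases List.mem_cons.mp hx with h | h
    · subst h
      have hxs : x ∉ s := (List.nodup_cons.mp hnd).1
      simp only [List.map_cons, List.sum_cons, if_pos]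
      have hmc : s.map (fun k => if k = x then g k + c else g k) = s.map g :=
        List.map_congr_left (fun k hk => if_neg (by rintro rfl; exact hxs hk))
      rw [hmc]; ring
    · have hax : a ≠ x := by rintro rfl; exact (List.nodup_cons.mp hnd).1 h
      simp only [List.map_cons, List.sum_cons, if_neg hax]
      rw [ih h (List.nodup_cons.mp hnd).2]; ring

theorem S2_append {K : Type} [BEq K] [LawfulBEq K] [DecidableEq K] (M : List K) (x : K) :
    S2 (M ++ [x]) = S2 M + (M.count x : Int) := by
  unfold S2
  have hset : PySem.Set.ofList (M ++ [x]) = PySem.Set.add (PySem.Set.ofList M) x := by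
    rw [PySem.Set.ofList_eq_foldl, PySem.Set.ofList_eq_foldl, List.foldl_append]
    rfl
  by_cases hx : x ∈ M
  · have hcontains : (PySem.Set.ofList M).contains x = true := by
      simp [PySem.Set.contains, PySem.Set.mem_ofList, hx]
    rw [hset, PySem.Set.add, if_pos hcontains]
    have hmc : (PySem.Set.ofList M).map (fun k => f2 (((M ++ [x]).count k : Int))) =
        (PySem.Set.ofList M).map (fun k =>
          if k = x then f2 ((M.count k : Int)) + (M.count x : Int) else f2 ((M.count k : Int))) := by
      apply List.map_congr_left
      intro k hk
      by_cases hkx : k = x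
      · subst hkx
        simp only [List.count_append, List.count_singleton, beq_self_eq_true, if_pos trivial]
        push_cast
        rw [f2_succ]
      · simp only [if_neg hkx, List.count_append, List.count_singleton]
        rw [show (x == k) = false by simp [beq_eq_false_iff_ne]; exact fun h => hkx h.symm]
        simp
    rw [hmc, sum_map_update _ x (by rw [PySem.Set.mem_ofList]; exact hx) (PySem.Set.nodup_ofList M)]
  · have hcontains : (PySem.Set.ofList M).contains x = false := by
      simp [PySem.Set.contains, PySem.Set.mem_ofList, hx]
    rw [hset, PySem.Set.add, if_neg (by rw [hcontains]; simp), List.map_append, List.sum_append]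
    have hmc : (PySem.Set.ofList M).map (fun k => f2 (((M ++ [x]).count k : Int))) =
        (PySem.Set.ofList M).map (fun k => f2 ((M.count k : Int))) := by
      apply List.map_congr_left
      intro k hk
      have hkM : k ∈ M := (PySem.Set.mem_ofList _ _).mp hk
      have hkx : (x == k) = false := by
        simp only [beq_eq_false_iff_ne]; rintro rfl; exact hx hkM
      simp [List.count_append, List.count_singleton, hkx]
    rw [hmc]
    have hcx : M.count x = 0 := List.count_eq_zero_of_not_mem hx
    simp [List.count_append, List.count_singleton, hcx]
    decide

theorem cnt_empty_eq_S2 {K : Type} [BEq K] [LawfulBEq K] [DecidableEq K] (L : List K) :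
    cnt (PySem.Dict.empty : PySem.Dict K Int) L = S2 L := by
  induction L using List.reverseRecOn with
  | nil => simp [cnt, S2, PySem.Set.ofList]
  | append_singleton M x ih =>
    rw [cnt_append, ih, S2_append]
    unfold dfin
    rw [PySem.Dict.getD_foldl_insert_add_one]
    simp [PySem.Dict.getD_empty]

theorem foldB (cs : List Char) (st : EState) :
    cs.foldl bStep st =
      { a := (cs.foldl updT (st.a, st.b, st.c)).1,
        b := (cs.foldl updT (st.a, st.b, st.c)).2.1,
        c := (cs.foldl updT (st.a, st.b, st.c)).2.2,
        d3 := dfin st.d3 ((tripT (st.a, st.b, st.c) cs).map key3),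
        dab := dfin st.dab ((tripT (st.a, st.b, st.c) cs).map kab),
        dac := dfin st.dac ((tripT (st.a, st.b, st.c) cs).map kac),
        dbc := dfin st.dbc ((tripT (st.a, st.b, st.c) cs).map kbc),
        ans := st.ans + 2 * cnt st.d3 ((tripT (st.a, st.b, st.c) cs).map key3)
                 - cnt st.dab ((tripT (st.a, st.b, st.c) cs).map kab)
                 - cnt st.dac ((tripT (st.a, st.b, st.c) cs).map kac)
                 - cnt st.dbc ((tripT (st.a, st.b, st.c) cs).map kbc) } := by
  induction cs generalizing st with
  | nil =>
    cases st
    simp [tripT, cnt, dfin]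
  | cons ch cs ih =>
    rw [List.foldl_cons, ih]
    simp only [bStep, tripT, updT, List.map_cons, cnt, dfin, List.foldl_cons, key3, kab, kac, kbc]
    refine EState.mk.injEq .. ▸ ?_
    simp only [true_and]
    ring

theorem arrays_eq (cs : List Char) (A0 B0 C0 : List Int) (t : Int × Int × Int) :
    cs.foldl buildStep (A0 ++ [t.1], B0 ++ [t.2.1], C0 ++ [t.2.2]) =
      (A0 ++ (trip t cs).map (·.1), B0 ++ (trip t cs).map (·.2.1), C0 ++ (trip t cs).map (·.2.2)) := by
  induction cs generalizing A0 B0 C0 t with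
  | nil => simp [trip]
  | cons ch cs ih =>
    rw [List.foldl_cons]
    have hstep : buildStep (A0 ++ [t.1], B0 ++ [t.2.1], C0 ++ [t.2.2]) ch =
        ((A0 ++ [t.1]) ++ [(updT t ch).1], (B0 ++ [t.2.1]) ++ [(updT t ch).2.1],
         (C0 ++ [t.2.2]) ++ [(updT t ch).2.2]) := by
      simp [buildStep, updT]
    rw [hstep, ih]
    simp [trip]

theorem counter_fold_key {K A : Type} [BEq K] (T : List A) (key : A → K) :
    T.foldl (fun d a => d.modify (key a) 0 (· + 1)) PySem.Dict.empty =
      PySem.Dict.counter (T.map key) := by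
  rw [PySem.Dict.counter_eq_foldl, List.foldl_map]

theorem values_counter {K : Type} [BEq K] [LawfulBEq K] (L : List K) :
    (PySem.Dict.counter L).values = (PySem.Set.ofList L).map (fun k => (L.count k : Int)) := by
  rw [PySem.Dict.values, PySem.Dict.items_counter, List.map_map]
  rfl

theorem solveA_char (N : Int) (S : String) :
    solve N S = PySem.Int.floordiv (N * (N + 1)) 2
      + 2 * S2 ((trip (0, 0, 0) S.toList).map key3)
      - S2 ((trip (0, 0, 0) S.toList).map kab)
      - S2 ((trip (0, 0, 0) S.toList).map kac)
      - S2 ((trip (0, 0, 0) S.toList).map kbc) := by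
  simp only [solve]
  have harr := arrays_eq S.toList [] [] [] (0, 0, 0)
  simp only [List.nil_append] at harr
  rw [harr]
  dsimp only
  simp only [List.zip_map']
  simp only [List.foldl_map]
  rw [counter_fold_key (key := fun x : Int × Int × Int => ((x.1 - x.2.1, x.1 - x.2.2) : Int × Int)),
    counter_fold_key (key := fun x : Int × Int × Int => (x.1 - x.2.1 : Int)),
    counter_fold_key (key := fun x : Int × Int × Int => (x.1 - x.2.2 : Int)),
    counter_fold_key (key := fun x : Int × Int × Int => (x.2.1 - x.2.2 : Int))]
  rw [values_counter, values_counter, values_counter, values_counter]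
  rw [PySem.List.foldl_add (g := fun v : Int => 2 * PySem.Int.floordiv (v * (v - 1)) 2)]
  rw [foldl_sub, foldl_sub, foldl_sub]
  simp only [List.map_map, Function.comp_def, S2, f2]
  rw [List.sum_map_mul_left]
  rfl

theorem solveB_char (N : Int) (S : String) :
    solve_alt N S = PySem.Int.floordiv (N * (N + 1)) 2
      + 2 * cnt PySem.Dict.empty ((trip (0, 0, 0) S.toList).map key3)
      - cnt PySem.Dict.empty ((trip (0, 0, 0) S.toList).map kab)
      - cnt PySem.Dict.empty ((trip (0, 0, 0) S.toList).map kac)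
      - cnt PySem.Dict.empty ((trip (0, 0, 0) S.toList).map kbc) := by
  simp only [solve_alt]
  rw [foldB]
  rw [trip_eq_cons, List.map_cons, List.map_cons, List.map_cons, List.map_cons]
  simp only [cnt, key3, kab, kac, kbc, PySem.Dict.getD_empty]
  have h1 : PySem.Dict.ofList [(((0 : Int), (0 : Int)), (1 : Int))] =
      PySem.Dict.empty.insert (0, 0) 1 := by decide
  have h2 : PySem.Dict.ofList [((0 : Int), (1 : Int))] = PySem.Dict.empty.insert 0 1 := by decide
  rw [h1, h2]
  norm_num

-- ===== VERDICT (by name: the statement is the Claim_ definition above) =====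
theorem solve_spec : Claim_equal_solve := by
  intro N S _
  unfold Spec_solve
  rw [solveA_char, solveB_char, cnt_empty_eq_S2, cnt_empty_eq_S2, cnt_empty_eq_S2, cnt_empty_eq_S2]
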